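-- pv_equiv track=rewrite | github.com/mmtnz/restaurant-booking-manager | tools/reservations_functions.py | get_booked_tables
-- ===== SOURCE A (Python) =====
-- def get_booked_tables(tables_list, num_total_tables):
--     """
--     To find what table is reserved
--     :param tables_list: database table(s) column with each reservation's tables
--     :param num_total_tables: total number of tables
--     :return: boolean list with True if the table is reserved, number of rserved tables
--     """
--
--     is_table_reserved_list = [False] * num_total_tables
--     num_reserved_tables = 0
--     for reservation_tables in tables_list:
--         tables = reservation_tables.split('-')
--         for table in tables:
--             is_table_reserved_list[int(table)-1] = True
--             num_reserved_tables += 1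
--     return is_table_reserved_list, num_reserved_tables
-- ===== SOURCE B (Python) =====
-- def get_booked_tables(tables_list, num_total_tables):
--     """
--     To find what table is reserved
--     :param tables_list: database table(s) column with each reservation's tables
--     :param num_total_tables: total number of tables
--     :return: boolean list with True if the table is reserved, number of rserved tables
--     """
--
--     tokens = [int(table) for reservation_tables in tables_list
--               for table in reservation_tables.split('-')]
--     is_table_reserved_list = [any(k - 1 == i for k in tokens)
--                               for i in range(num_total_tables)]
--     return is_table_reserved_list, len(tokens)
-- ===== Notes on version B (the rewrite author's own statement) =====
-- stated objective: alternative
-- what changed: B replaces A's single mutating pass (scattered indexed writes into a preallocated list plus a running counter) by two staged passes: it first flattens and parses all reservation strings into one token list, then builds the boolean list by a per-index linear scan of that token list, and returns len(tokens) as the count.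
-- intended difference: On inputs where some reservation token parses to a table number k <= 0 (within Python's negative-index range) and no token names table k + num_total_tables, A silently wraps the negative index and marks the table at position k-1+num_total_tables as reserved, while B marks no table for that token; B's value is intended because table number 0 or below does not denote the last tables. — e.g. on get_booked_tables(["0"], 2): A returns ([false, true], 1), B returns ([false, false], 1)
import Mathlib
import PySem

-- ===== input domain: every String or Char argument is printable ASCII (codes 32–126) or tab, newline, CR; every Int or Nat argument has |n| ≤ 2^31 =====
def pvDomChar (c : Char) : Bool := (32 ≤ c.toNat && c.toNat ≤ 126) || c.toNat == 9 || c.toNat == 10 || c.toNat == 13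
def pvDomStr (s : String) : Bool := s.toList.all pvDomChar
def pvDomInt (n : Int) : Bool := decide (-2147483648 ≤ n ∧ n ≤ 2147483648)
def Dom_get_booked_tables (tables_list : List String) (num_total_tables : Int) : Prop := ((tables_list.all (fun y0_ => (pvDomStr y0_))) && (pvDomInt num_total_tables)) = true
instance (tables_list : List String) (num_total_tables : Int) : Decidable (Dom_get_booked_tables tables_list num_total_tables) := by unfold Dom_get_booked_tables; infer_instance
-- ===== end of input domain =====

-- B is staged: it first flattens all reservation strings into one parsed token list, then builds
-- the boolean list by a per-index scan of that list and returns its length as the count, instead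
-- of A's single pass of indexed writes with a running counter; alternative shape, not faster.

-- ===== PORT A =====
-- split('-') has a non-empty separator, so PySem.Str.split? is always `some`; `.getD []` only
-- removes the impossible `none`. int(table) is PySem.Int.ofStr?; where it is `none` Python raises
-- ValueError and where the index is out of range Python raises IndexError — both excluded by Pre_,
-- so the total forms `.getD 0` / pySetD are exact on Pre_.
def get_booked_tables (tables_list : List String) (num_total_tables : Int) : List Bool × Int :=
  tables_list.foldl
    (fun st reservation_tables =>
      ((PySem.Str.split? reservation_tables "-").getD []).foldl
        (fun st table =>
          (PySem.List.pySetD st.1 ((PySem.Int.ofStr? table).getD 0 - 1) true, st.2 + 1))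
        st)
    (List.replicate num_total_tables.toNat false, 0)

-- ===== PORT B =====
-- the nested comprehension is the flatMap of the per-reservation parsed token lists;
-- any(...) is List.any; len(tokens) is the list length.
def get_booked_tables_alt (tables_list : List String) (num_total_tables : Int) : List Bool × Int :=
  let tokens := tables_list.flatMap (fun reservation_tables =>
    ((PySem.Str.split? reservation_tables "-").getD []).map
      (fun table => (PySem.Int.ofStr? table).getD 0))
  ((PySem.List.pyRange 0 num_total_tables 1).map
      (fun i => tokens.any (fun k => k - 1 == i)),
   (tokens.length : Int))

-- ===== PRECONDITION & SPEC =====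
-- Pre_ excludes exactly the inputs where A raises: a token on which int() raises ValueError, or a
-- parsed index int(token)-1 outside Python's (negative-index) range for a list of length
-- max(num_total_tables, 0), where A raises IndexError.
def Pre_get_booked_tables (tables_list : List String) (num_total_tables : Int) : Prop :=
  ∀ r ∈ tables_list, ∀ t ∈ (PySem.Str.split? r "-").getD [],
    ∃ k ∈ (PySem.Int.ofStr? t).toList, PySem.Raise.InRange num_total_tables.toNat (k - 1)
instance (tables_list : List String) (num_total_tables : Int) : Decidable (Pre_get_booked_tables tables_list num_total_tables) := by unfold Pre_get_booked_tables; infer_instance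
def pvWitness_get_booked_tables : List String × Int := (["1-3", "2"], 3)

-- On inputs where some token parses to k ≤ 0 (in Python's negative-index range) and no token names
-- table k + num_total_tables, A wraps the negative index and marks the table at position
-- k - 1 + num_total_tables as reserved, while B marks no table for that token; B's value is
-- intended because table number 0 or below does not denote the last tables.
def D_get_booked_tables (tables_list : List String) (num_total_tables : Int) : Prop :=
  ∃ r ∈ tables_list, ∃ t ∈ (PySem.Str.split? r "-").getD [],
    ∃ k ∈ (PySem.Int.ofStr? t).toList, k ≤ 0 ∧
      ∀ r' ∈ tables_list, ∀ t' ∈ (PySem.Str.split? r' "-").getD [],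
        ∀ k' ∈ (PySem.Int.ofStr? t').toList, k' ≠ k + num_total_tables
instance (tables_list : List String) (num_total_tables : Int) : Decidable (D_get_booked_tables tables_list num_total_tables) := by unfold D_get_booked_tables; infer_instance

def Spec_get_booked_tables (tables_list : List String) (num_total_tables : Int) (out : List Bool × Int) : Prop := ¬ D_get_booked_tables tables_list num_total_tables → out = get_booked_tables_alt tables_list num_total_tables
instance (tables_list : List String) (num_total_tables : Int) (out : List Bool × Int) : Decidable (Spec_get_booked_tables tables_list num_total_tables out) := by unfold Spec_get_booked_tables; infer_instance

def pvDiffWitness_get_booked_tables : List String × Int := (["0"], 2)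
def pvDiffWitnessOut_get_booked_tables : (List Bool × Int) × (List Bool × Int) :=
  (([false, true], 1), ([false, false], 1))

-- ===== CLAIM (what is proved, stated in full; the proofs are below) =====
def Claim_unchanged_get_booked_tables : Prop := ∀ (tables_list : List String) (num_total_tables : Int), Dom_get_booked_tables tables_list num_total_tables → Pre_get_booked_tables tables_list num_total_tables → Spec_get_booked_tables tables_list num_total_tables (get_booked_tables tables_list num_total_tables)
def Claim_exact_get_booked_tables : Prop := ∀ (tables_list : List String) (num_total_tables : Int), Dom_get_booked_tables tables_list num_total_tables → Pre_get_booked_tables tables_list num_total_tables → D_get_booked_tables tables_list num_total_tables → get_booked_tables tables_list num_total_tables ≠ get_booked_tables_alt tables_list num_total_tables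
def Claim_changed_get_booked_tables : Prop := Dom_get_booked_tables (pvDiffWitness_get_booked_tables.1) (pvDiffWitness_get_booked_tables.2) ∧ Pre_get_booked_tables (pvDiffWitness_get_booked_tables.1) (pvDiffWitness_get_booked_tables.2) ∧ D_get_booked_tables (pvDiffWitness_get_booked_tables.1) (pvDiffWitness_get_booked_tables.2) ∧ get_booked_tables (pvDiffWitness_get_booked_tables.1) (pvDiffWitness_get_booked_tables.2) = pvDiffWitnessOut_get_booked_tables.1 ∧ get_booked_tables_alt (pvDiffWitness_get_booked_tables.1) (pvDiffWitness_get_booked_tables.2) = pvDiffWitnessOut_get_booked_tables.2 ∧ pvDiffWitnessOut_get_booked_tables.1 ≠ pvDiffWitnessOut_get_booked_tables.2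

-- ===== LEMMAS AND PROOFS =====

-- the flattened list of parsed token values (total form; exact under Pre_)
def pvToks (tables_list : List String) : List Int :=
  tables_list.flatMap (fun r =>
    ((PySem.Str.split? r "-").getD []).map (fun t => (PySem.Int.ofStr? t).getD 0))

def pvMark (l : List Bool) (k : Int) : List Bool := PySem.List.pySetD l (k - 1) true

lemma pvA_inner (ts : List String) : ∀ (l : List Bool) (c : Int),
    ts.foldl (fun st table =>
        (PySem.List.pySetD st.1 ((PySem.Int.ofStr? table).getD 0 - 1) true, st.2 + 1)) (l, c)
      = ((ts.map (fun t => (PySem.Int.ofStr? t).getD 0)).foldl pvMark l, c + ts.length) := by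
  induction ts with
  | nil => intro l c; simp
  | cons t ts ih =>
    intro l c
    simp only [List.foldl_cons, List.map_cons, ih, pvMark]
    refine Prod.ext rfl ?_
    simp only [List.length_cons]; push_cast; ring

lemma pvA_fold (tl : List String) : ∀ (l : List Bool) (c : Int),
    tl.foldl (fun st reservation_tables =>
        ((PySem.Str.split? reservation_tables "-").getD []).foldl
          (fun st table =>
            (PySem.List.pySetD st.1 ((PySem.Int.ofStr? table).getD 0 - 1) true, st.2 + 1)) st)
      (l, c)
      = ((pvToks tl).foldl pvMark l, c + (pvToks tl).length) := by
  induction tl with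
  | nil => intro l c; simp [pvToks]
  | cons r tl ih =>
    intro l c
    simp only [List.foldl_cons, pvA_inner, ih, pvToks, List.flatMap_cons, List.foldl_append,
      List.length_append, List.length_map]
    refine Prod.ext rfl ?_
    push_cast; ring

lemma pvSetGet (l : List Bool) (i : Int) (j : Nat) :
    (PySem.List.pySetD l i true)[j]? =
      if (0 ≤ i ∧ i < (l.length : Int) ∧ i = (j : Int)) ∨
         (-(l.length : Int) ≤ i ∧ i < 0 ∧ i + (l.length : Int) = (j : Int)) then some true
      else l[j]? := by
  simp only [PySem.List.pySetD, PySem.List.pySet?, PySem.List.pyIdx?]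
  by_cases h0 : 0 ≤ i
  · by_cases h1 : i < (l.length : Int)
    · rw [if_pos h0, if_pos h1]
      simp only [Option.map_some, Option.getD_some, List.getElem?_set]
      by_cases hij : i = (j : Int)
      · rw [if_pos (show i.toNat = j by omega), if_pos (show i.toNat < l.length by omega),
          if_pos (Or.inl ⟨h0, h1, hij⟩)]
      · rw [if_neg (show ¬ i.toNat = j by omega), if_neg]
        rintro (⟨_, _, h⟩ | ⟨_, h, _⟩) <;> omega
    · rw [if_pos h0, if_neg h1]
      simp only [Option.map_none, Option.getD_none]
      rw [if_neg]
      rintro (⟨_, h, _⟩ | ⟨_, h, _⟩) <;> omega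
  · by_cases h1 : -(l.length : Int) ≤ i
    · rw [if_neg h0, if_pos h1]
      simp only [Option.map_some, Option.getD_some, List.getElem?_set]
      by_cases hij : i + (l.length : Int) = (j : Int)
      · rw [if_pos (show l.length - (-i).toNat = j by omega),
          if_pos (show l.length - (-i).toNat < l.length by omega),
          if_pos (Or.inr ⟨h1, by omega, hij⟩)]
      · rw [if_neg (show ¬ l.length - (-i).toNat = j by omega), if_neg]
        rintro (⟨h, _, _⟩ | ⟨_, _, h⟩) <;> omega
    · rw [if_neg h0, if_neg h1]
      simp only [Option.map_none, Option.getD_none]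
      rw [if_neg]
      rintro (⟨h, _, _⟩ | ⟨h, _, _⟩) <;> omega

lemma pvGetMark (ts : List Int) : ∀ (l : List Bool) (j : Nat),
    (ts.foldl pvMark l)[j]? =
      if ∃ k ∈ ts, (0 ≤ k - 1 ∧ k - 1 < (l.length : Int) ∧ k - 1 = (j : Int)) ∨
          (-(l.length : Int) ≤ k - 1 ∧ k - 1 < 0 ∧ k - 1 + (l.length : Int) = (j : Int))
        then some true else l[j]? := by
  induction ts with
  | nil => intro l j; simp
  | cons k ts ih =>
    intro l j
    simp only [List.foldl_cons]
    rw [ih]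
    simp only [pvMark, PySem.List.length_pySetD, pvSetGet]
    by_cases h1 : ∃ k' ∈ ts, (0 ≤ k' - 1 ∧ k' - 1 < (l.length : Int) ∧ k' - 1 = (j : Int)) ∨
        (-(l.length : Int) ≤ k' - 1 ∧ k' - 1 < 0 ∧ k' - 1 + (l.length : Int) = (j : Int))
    · rw [if_pos h1, if_pos]
      rcases h1 with ⟨k', hk', hP⟩
      exact ⟨k', List.mem_cons_of_mem _ hk', hP⟩
    · rw [if_neg h1]
      by_cases h2 : (0 ≤ k - 1 ∧ k - 1 < (l.length : Int) ∧ k - 1 = (j : Int)) ∨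
          (-(l.length : Int) ≤ k - 1 ∧ k - 1 < 0 ∧ k - 1 + (l.length : Int) = (j : Int))
      · rw [if_pos h2, if_pos ⟨k, List.mem_cons_self, h2⟩]
      · rw [if_neg h2, if_neg]
        rintro ⟨k', hk', hP⟩
        rcases List.mem_cons.mp hk' with rfl | hmem
        · exact h2 hP
        · exact h1 ⟨k', hmem, hP⟩

lemma pvMemToks (tl : List String) (k : Int) :
    k ∈ pvToks tl ↔ ∃ r ∈ tl, ∃ t ∈ (PySem.Str.split? r "-").getD [],
      (PySem.Int.ofStr? t).getD 0 = k := by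
  simp [pvToks, List.mem_flatMap, List.mem_map]

lemma pvToksParse (tl : List String) (n : Int)
    (hpre : Pre_get_booked_tables tl n) (k : Int) (hk : k ∈ pvToks tl) :
    (∃ r ∈ tl, ∃ t ∈ (PySem.Str.split? r "-").getD [], PySem.Int.ofStr? t = some k) ∧
      PySem.Raise.InRange n.toNat (k - 1) := by
  rcases (pvMemToks tl k).mp hk with ⟨r, hr, t, ht, hval⟩
  rcases hpre r hr t ht with ⟨k', hk', hrange⟩
  rw [Option.mem_toList] at hk'
  rw [hk'] at hval
  simp only [Option.getD_some] at hval
  subst hval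
  exact ⟨⟨r, hr, t, ht, hk'⟩, hrange⟩

-- the logical core: under Pre_ and ¬ D_, a position is wrap-marked by A iff some token names it
lemma pvCore (tl : List String) (n : Int)
    (hpre : Pre_get_booked_tables tl n) (hnd : ¬ D_get_booked_tables tl n)
    (j : Nat) (hj : j < n.toNat) :
    (∃ k ∈ pvToks tl, (0 ≤ k - 1 ∧ k - 1 < (n.toNat : Int) ∧ k - 1 = (j : Int)) ∨
        (-(n.toNat : Int) ≤ k - 1 ∧ k - 1 < 0 ∧ k - 1 + (n.toNat : Int) = (j : Int)))
      ↔ ∃ k ∈ pvToks tl, k - 1 = (j : Int) := by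
  have hn : (n.toNat : Int) = n := by omega
  constructor
  · rintro ⟨k, hk, hP⟩
    rcases hP with ⟨_, _, hkj⟩ | ⟨_, hneg, hkj⟩
    · exact ⟨k, hk, hkj⟩
    · -- negative wrap: ¬ D_ supplies a token with value k + n
      rcases pvToksParse tl n hpre k hk with ⟨⟨r, hr, t, ht, hparse⟩, _⟩
      unfold D_get_booked_tables at hnd
      push_neg at hnd
      have := hnd r hr t ht k (Option.mem_toList.mpr hparse) (by omega)
      rcases this with ⟨r', hr', t', ht', k', hk', hval⟩
      rw [Option.mem_toList] at hk'
      subst hval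
      refine ⟨k + n, ?_, by omega⟩
      exact (pvMemToks tl (k + n)).mpr ⟨r', hr', t', ht', by simp [hk']⟩
  · rintro ⟨k, hk, hkj⟩
    exact ⟨k, hk, Or.inl ⟨by omega, by omega, hkj⟩⟩

lemma pvA_eq (tl : List String) (n : Int) :
    get_booked_tables tl n
      = ((pvToks tl).foldl pvMark (List.replicate n.toNat false),
          0 + ((pvToks tl).length : Int)) := by
  unfold get_booked_tables; rw [pvA_fold]

lemma pvB_eq (tl : List String) (n : Int) :
    get_booked_tables_alt tl n
      = ((PySem.List.pyRange 0 n 1).map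
            (fun i => (pvToks tl).any (fun k => k - 1 == i)),
          ((pvToks tl).length : Int)) := rfl

lemma pvAnyEq (tl : List String) (x : Int) :
    (pvToks tl).any (fun k => k - 1 == x) = decide (∃ k ∈ pvToks tl, k - 1 = x) := by
  by_cases h : ∃ k ∈ pvToks tl, k - 1 = x
  · simp only [h, decide_true]
    rcases h with ⟨k, hk, hkx⟩
    exact List.any_eq_true.mpr ⟨k, hk, by simpa using hkx⟩
  · simp only [h, decide_false]
    rw [Bool.eq_false_iff]
    intro hc
    rcases List.any_eq_true.mp hc with ⟨k, hk, hkx⟩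
    exact h ⟨k, hk, by simpa using hkx⟩

-- ===== VERDICT (by name: the statement is the Claim_ definition above) =====
theorem get_booked_tables_spec : Claim_unchanged_get_booked_tables := by
  intro tl n _ hpre
  unfold Spec_get_booked_tables
  intro hnd
  rw [pvA_eq, pvB_eq]
  refine Prod.ext ?_ (by push_cast; ring)
  show (pvToks tl).foldl pvMark (List.replicate n.toNat false)
      = (PySem.List.pyRange 0 n 1).map (fun i => (pvToks tl).any (fun k => k - 1 == i))
  apply List.ext_getElem?
  intro j
  rw [pvGetMark, PySem.List.pyRange_one]
  simp only [List.length_replicate, List.map_map, List.getElem?_map, Function.comp_def,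
    sub_zero, zero_add, List.getElem?_replicate, pvAnyEq]
  by_cases hj : j < n.toNat
  · rw [List.getElem?_range hj]
    simp only [Option.map_some]
    by_cases hP : ∃ k ∈ pvToks tl, k - 1 = (j : Int)
    · rw [if_pos ((pvCore tl n hpre hnd j hj).mpr hP)]
      simp [hP]
    · rw [if_neg (fun h => hP ((pvCore tl n hpre hnd j hj).mp h)), if_pos hj]
      simp [hP]
  · rw [List.getElem?_eq_none (by simpa using hj)]
    simp only [Option.map_none]
    rw [if_neg, if_neg hj]
    rintro ⟨k, _, ⟨_, _, h⟩ | ⟨_, _, h⟩⟩ <;> omega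

theorem get_booked_tables_tight : Claim_exact_get_booked_tables := by
  intro tl n _ hpre hd heq
  rcases hd with ⟨r, hr, t, ht, k0, hk0mem, hk0le, hnone⟩
  rw [Option.mem_toList] at hk0mem
  have hk0toks : k0 ∈ pvToks tl :=
    (pvMemToks tl k0).mpr ⟨r, hr, t, ht, by simp [hk0mem]⟩
  have hrange := (pvToksParse tl n hpre k0 hk0toks).2
  unfold PySem.Raise.InRange at hrange
  have hn1 : 1 ≤ n.toNat := by omega
  have hn : (n.toNat : Int) = n := by omega
  set j : Nat := (k0 - 1 + n.toNat).toNat with hjdef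
  have hj : (j : Int) = k0 - 1 + n.toNat := by omega
  have hjlt : j < n.toNat := by omega
  have hAj : ((pvToks tl).foldl pvMark (List.replicate n.toNat false))[j]? = some true := by
    rw [pvGetMark]
    simp only [List.length_replicate]
    rw [if_pos ⟨k0, hk0toks, Or.inr ⟨by omega, by omega, by omega⟩⟩]
  have hBj : ((PySem.List.pyRange 0 n 1).map
        (fun i => (pvToks tl).any (fun k => k - 1 == i)))[j]?
      = some false := by
    rw [PySem.List.pyRange_one]
    simp only [List.map_map, List.getElem?_map, Function.comp_def, sub_zero, zero_add,
      pvAnyEq]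
    rw [List.getElem?_range hjlt]
    simp only [Option.map_some, Option.some.injEq]
    rw [decide_eq_false_iff_not]
    rintro ⟨k, hk, hkx⟩
    rcases (pvToksParse tl n hpre k hk).1 with ⟨r', hr', t', ht', hparse⟩
    exact hnone r' hr' t' ht' k (Option.mem_toList.mpr hparse) (by omega)
  rw [pvA_eq, pvB_eq] at heq
  have hfst := congrArg (fun p : List Bool × Int => p.1[j]?) heq
  simp only at hfst
  rw [hAj, hBj] at hfst
  exact Bool.noConfusion (Option.some.inj hfst)

theorem get_booked_tables_changed : Claim_changed_get_booked_tables := by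
  unfold Claim_changed_get_booked_tables; decide
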